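-- pv_equiv track=rewrite | github.com/daniel-reich/ubiquitous-fiesta | hQRuQguN4bKyM2gik_9.py | simple_check
-- ===== SOURCE A (Python) =====
-- def simple_check(a, b):
--   min_num = min(a, b)
--   max_num = max(a, b)
--   count = 0
--   while min_num > 0:
--     if max_num % min_num == 0:
--       count +=1
--     min_num -= 1
--     max_num -= 1
--   return count
-- ===== SOURCE B (Python) =====
-- def simple_check(a, b):
--     m = min(a, b)
--     if m <= 0:
--         return 0
--     d = abs(a - b)
--     if d == 0:
--         return m
--     count = 0
--     i = 1
--     while i * i <= d:
--         if d % i == 0: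
--             if i <= m:
--                 count += 1
--             j = d // i
--             if j != i and j <= m:
--                 count += 1
--         i += 1
--     return count
-- ===== Notes on version B (the rewrite author's own statement) =====
-- stated objective: faster
-- what changed: Instead of stepping min(a,b) and max(a,b) down together and testing divisibility at every step, B counts the divisors of d=|a-b| that are at most min(a,b) by trial division up to sqrt(d) (with a==b handled as min(a,b), and nonpositive min as 0).
import Mathlib
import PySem

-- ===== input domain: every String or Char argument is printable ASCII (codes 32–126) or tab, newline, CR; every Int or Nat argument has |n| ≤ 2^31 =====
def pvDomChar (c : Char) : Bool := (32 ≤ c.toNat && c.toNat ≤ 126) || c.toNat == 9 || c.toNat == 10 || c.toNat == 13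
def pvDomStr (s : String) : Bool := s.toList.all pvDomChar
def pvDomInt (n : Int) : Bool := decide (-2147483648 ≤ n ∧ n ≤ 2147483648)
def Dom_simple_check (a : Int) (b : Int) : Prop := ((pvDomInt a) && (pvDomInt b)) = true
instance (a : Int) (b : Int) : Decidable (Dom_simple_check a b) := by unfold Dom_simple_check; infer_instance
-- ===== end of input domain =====

-- B replaces A's step-by-step descent from min(a,b) by trial division up to sqrt(|a-b|),
-- counting the divisors of |a-b| that are ≤ min(a,b) (objective: faster).

-- ===== PORT A =====
-- A's while loop: state (min_num, max_num, count)
def pvLoopA (mn : Int) (mx : Int) (c : Int) : Int :=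
  if h : mn > 0 then
    pvLoopA (mn - 1) (mx - 1) (if PySem.Int.mod mx mn = 0 then c + 1 else c)
  else c
termination_by mn.toNat
decreasing_by omega

def simple_check (a : Int) (b : Int) : Int :=
  pvLoopA (min a b) (max a b) 0

-- ===== PORT B =====
-- B's while loop: i runs while i*i ≤ d, counting the divisors i and d//i of d that are ≤ m
def pvLoopB (d : Int) (m : Int) (i : Int) (c : Int) : Int :=
  if h : i * i ≤ d then
    pvLoopB d m (i + 1)
      (if PySem.Int.mod d i = 0 then
        (let c' := if i ≤ m then c + 1 else c
         let j := PySem.Int.floordiv d i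
         if j ≠ i ∧ j ≤ m then c' + 1 else c')
       else c)
  else c
termination_by (d + 1 - i).toNat
decreasing_by
  have hi : i ≤ d := by nlinarith [sq_nonneg i, sq_nonneg (i - 1)]
  omega

def simple_check_alt (a : Int) (b : Int) : Int :=
  let m := min a b
  if m ≤ 0 then 0
  else
    let d := |a - b|
    if d = 0 then m
    else pvLoopB d m 1 0

-- ===== PRECONDITION & SPEC =====
def Spec_simple_check (a : Int) (b : Int) (out : Int) : Prop := out = simple_check_alt a b
instance (a : Int) (b : Int) (out : Int) : Decidable (Spec_simple_check a b out) := by unfold Spec_simple_check; infer_instance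

-- ===== CLAIM (what is proved, stated in full; the proofs are below) =====
def Claim_equal_simple_check : Prop := ∀ (a : Int) (b : Int), Dom_simple_check a b → Spec_simple_check a b (simple_check a b)

-- ===== LEMMAS AND PROOFS =====

-- the set both loops count: divisors k of dn with 1 ≤ k ≤ M
def pvDivs (dn M : ℕ) : Finset ℕ := (Finset.Icc 1 M).filter (fun k => k ∣ dn)

-- A's loop counts pvDivs
theorem pvLoopA_eq (n : ℕ) (dn : ℕ) (c : Int) :
    pvLoopA (n : Int) ((n : Int) + (dn : Int)) c = c + (pvDivs dn n).card := by
  induction n generalizing c with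
  | zero => rw [pvLoopA]; simp [pvDivs]
  | succ n ih =>
    rw [pvLoopA]
    have h1 : ((n+1 : ℕ) : Int) - 1 = (n : Int) := by push_cast; ring
    have h2 : ((n+1 : ℕ) : Int) + (dn : Int) - 1 = (n : Int) + (dn : Int) := by push_cast; ring
    rw [dif_pos (by positivity), h1, h2, ih]
    have hdvd : PySem.Int.mod (((n+1:ℕ) : Int) + (dn : Int)) ((n+1:ℕ) : Int) = 0 ↔ (n+1) ∣ dn := by
      rw [PySem.Int.mod_eq_zero_iff_dvd]
      constructor
      · intro h
        have := (dvd_add_right (dvd_refl ((n+1:ℕ) : Int))).mp h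
        exact_mod_cast this
      · intro h
        exact dvd_add (dvd_refl _) (by exact_mod_cast h)
    have hIcc : pvDivs dn (n+1) = if (n+1) ∣ dn then insert (n+1) (pvDivs dn n) else pvDivs dn n := by
      unfold pvDivs
      have : Finset.Icc 1 (n+1) = insert (n+1) (Finset.Icc 1 n) := by
        ext k; simp [Finset.mem_Icc]; omega
      rw [this, Finset.filter_insert]
    by_cases hd : (n+1) ∣ dn
    · rw [if_pos (hdvd.mpr hd), hIcc, if_pos hd,
        Finset.card_insert_of_notMem (by simp [pvDivs, Finset.mem_Icc])]
      push_cast; ring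
    · rw [if_neg (fun h => hd (hdvd.mp h)), hIcc, if_neg hd]

-- the residual set B's loop still has to count when its counter is i
def pvT (dn M i : ℕ) : Finset ℕ :=
  (Finset.Icc 1 M).filter (fun k => k ∣ dn ∧ i ≤ min k (dn / k))

-- the divisors B's loop picks up at counter i (those whose smaller cofactor is i)
def pvE (dn M i : ℕ) : Finset ℕ :=
  (Finset.Icc 1 M).filter (fun k => k ∣ dn ∧ min k (dn / k) = i)

theorem pvE_of_dvd (dn M i : ℕ) (hd : 1 ≤ dn) (hi : 1 ≤ i) (hsq : i * i ≤ dn) (hdvd : i ∣ dn) :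
    pvE dn M i = (if i ≤ M then {i} else ∅) ∪ (if dn / i ≠ i ∧ dn / i ≤ M then {dn / i} else ∅) := by
  have hij : i ≤ dn / i := Nat.le_div_iff_mul_le (by omega) |>.mpr (by omega)
  ext k
  simp only [pvE, Finset.mem_filter, Finset.mem_Icc, Finset.mem_union]
  constructor
  · rintro ⟨⟨h1, h2⟩, hk, hmin⟩
    rcases le_total k (dn / k) with hle | hle
    · have hki : k = i := by rw [min_eq_left hle] at hmin; exact hmin
      subst hki; left; simp [h2]
    · have hdk : dn / k = i := by rw [min_eq_right hle] at hmin; exact hmin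
      have hk' : k = dn / i := by rw [← hdk]; exact (Nat.div_div_self hk (by omega)).symm
      by_cases hne : dn / i = i
      · left; rw [hk', hne]; simp [hne ▸ hk' ▸ h2]
      · right; simp [hne, hk' ▸ h2, hk']
  · intro h
    rcases h with h | h
    · split_ifs at h with hM
      · simp only [Finset.mem_singleton] at h; subst h
        exact ⟨⟨hi, hM⟩, hdvd, by omega⟩
      · simp at h
    · split_ifs at h with hM
      · simp only [Finset.mem_singleton] at h; subst h
        have hj1 : 1 ≤ dn / i := by omega
        have hjd : dn / i ∣ dn := Nat.div_dvd_of_dvd hdvd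
        have : dn / (dn / i) = i := Nat.div_div_self hdvd (by omega)
        exact ⟨⟨hj1, hM.2⟩, hjd, by rw [this]; omega⟩
      · simp at h

theorem pvE_empty (dn M i : ℕ) (hnd : ¬ i ∣ dn) : pvE dn M i = ∅ := by
  ext k
  simp only [pvE, Finset.mem_filter, Finset.mem_Icc, Finset.notMem_empty, iff_false]
  rintro ⟨⟨h1, h2⟩, hk, hmin⟩
  rcases le_total k (dn / k) with hle | hle
  · rw [min_eq_left hle] at hmin; exact hnd (hmin ▸ hk)
  · rw [min_eq_right hle] at hmin; exact hnd (hmin ▸ Nat.div_dvd_of_dvd hk)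

theorem pvT_empty (dn M i : ℕ) (h : dn < i * i) : pvT dn M i = ∅ := by
  ext k
  simp only [pvT, Finset.mem_filter, Finset.mem_Icc, Finset.notMem_empty, iff_false]
  rintro ⟨⟨h1, h2⟩, hk, hmin⟩
  have h3 : k * (dn / k) = dn := Nat.mul_div_cancel' hk
  have h4 : i * i ≤ k * (dn / k) := Nat.mul_le_mul (by omega) (by omega)
  omega

theorem pvT_card (dn M i : ℕ) :
    (pvT dn M i).card = (pvT dn M (i+1)).card + (pvE dn M i).card := by
  have hu : pvT dn M i = pvT dn M (i+1) ∪ pvE dn M i := by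
    ext k
    simp only [pvT, pvE, ← Finset.filter_or, Finset.mem_filter, Finset.mem_Icc]
    constructor
    · rintro ⟨h1, hk, hmin⟩; exact ⟨h1, by omega⟩
    · rintro ⟨h1, h⟩
      rcases h with ⟨hk, hmin⟩ | ⟨hk, hmin⟩ <;> exact ⟨h1, hk, by omega⟩
  have hdisj : Disjoint (pvT dn M (i+1)) (pvE dn M i) := by
    rw [Finset.disjoint_left]
    intro k h1 h2
    simp only [pvT, pvE, Finset.mem_filter] at h1 h2
    omega
  rw [hu, Finset.card_union_of_disjoint hdisj]

-- B's loop counts what remains of pvT (fuel f bounds the remaining iterations)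
theorem pvLoopB_aux (dn M : ℕ) (hd : 1 ≤ dn) :
    ∀ (f i : ℕ) (c : Int), 1 ≤ i → dn + 1 - i ≤ f →
      pvLoopB (dn : Int) (M : Int) (i : Int) c = c + (pvT dn M i).card := by
  intro f
  induction f with
  | zero =>
    intro i c hi hf
    have hn : dn < i * i := lt_of_lt_of_le (by omega) (Nat.le_mul_of_pos_left i (by omega))
    rw [pvLoopB, dif_neg (by exact_mod_cast Nat.not_le.mpr hn), pvT_empty dn M i hn]
    simp
  | succ f ih =>
    intro i c hi hf
    by_cases hsq : i * i ≤ dn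
    · have hiled : i ≤ dn := le_trans (Nat.le_mul_of_pos_left i (by omega)) hsq
      rw [pvLoopB, dif_pos (by exact_mod_cast hsq),
        show ((i : Int) + 1) = ((i + 1 : ℕ) : Int) by push_cast; ring,
        ih (i+1) _ (by omega) (by omega), pvT_card dn M i,
        PySem.Int.mod_natCast dn i, PySem.Int.floordiv_natCast dn i]
      by_cases hdvd : i ∣ dn
      · rw [if_pos (by exact_mod_cast Nat.mod_eq_zero_of_dvd hdvd),
          pvE_of_dvd dn M i hd hi hsq hdvd]
        by_cases hne : dn / i = i
        · by_cases hiM : i ≤ M <;> simp [hiM, hne] <;> omega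
        · by_cases hiM : i ≤ M <;> by_cases hjM : dn / i ≤ M <;>
            simp [hiM, hne, hjM, Finset.singleton_union,
              Finset.card_insert_of_notMem, Ne.symm hne] <;> omega
      · rw [if_neg (by
          intro h
          exact hdvd (Nat.dvd_of_mod_eq_zero (by exact_mod_cast h))),
          pvE_empty dn M i hdvd]
        simp
    · rw [pvLoopB, dif_neg (by exact_mod_cast hsq), pvT_empty dn M i (by omega)]
      simp

theorem pvT_one (dn M : ℕ) (hd : 1 ≤ dn) : pvT dn M 1 = pvDivs dn M := by
  ext k
  simp only [pvT, pvDivs, Finset.mem_filter, Finset.mem_Icc, and_congr_right_iff]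
  intro hk
  constructor
  · rintro ⟨h1, _⟩; exact h1
  · intro h1
    refine ⟨h1, ?_⟩
    have : 0 < dn / k := Nat.div_pos (Nat.le_of_dvd (by omega) h1) (by omega)
    omega

-- ===== VERDICT (by name: the statement is the Claim_ definition above) =====
theorem simple_check_spec : Claim_equal_simple_check := by
  intro a b _
  unfold Spec_simple_check simple_check simple_check_alt
  by_cases hm0 : min a b ≤ 0
  · rw [pvLoopA, dif_neg (by omega)]
    simp [hm0]
  · rw [not_le] at hm0
    simp only [if_neg (not_le.mpr hm0)]
    have hMm : (((min a b).toNat : ℕ) : Int) = min a b := Int.toNat_of_nonneg (by omega)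
    have habs : max a b - min a b = |a - b| := by
      rw [max_comm, min_comm]; exact max_sub_min_eq_abs b a
    have hdcast : (((|a - b|).toNat : ℕ) : Int) = |a - b| := Int.toNat_of_nonneg (abs_nonneg _)
    have hmax : max a b = (((min a b).toNat : ℕ) : Int) + (((|a - b|).toNat : ℕ) : Int) := by
      rw [hMm, hdcast]; omega
    rw [show min a b = (((min a b).toNat : ℕ) : Int) from hMm.symm, hmax,
      pvLoopA_eq (min a b).toNat (|a - b|).toNat 0]
    by_cases hz : |a - b| = 0
    · have hdn0 : (|a - b|).toNat = 0 := by omega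
      rw [if_pos hz, hdn0]
      simp [pvDivs, Nat.card_Icc, hMm]
    · have hdn1 : 1 ≤ (|a - b|).toNat := by
        have := abs_nonneg (a - b); omega
      rw [if_neg hz,
        show |a - b| = (((|a - b|).toNat : ℕ) : Int) from hdcast.symm,
        show (1 : Int) = ((1 : ℕ) : Int) from rfl,
        pvLoopB_aux (|a - b|).toNat (min a b).toNat hdn1 (|a - b|).toNat 1 0 le_rfl (by omega),
        pvT_one _ _ hdn1]
      simp
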